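-- pv_equiv track=rewrite | github.com/albertwcheng/SplidarExpressionProcessingScript | Splidar.Expression.plotTMMGeneExpression.py | selectVectorByMatchingFlag
-- ===== SOURCE A (Python) =====
-- def selectVectorByMatchingFlag(listOfListSelectee,FlagVector,FlagValues,ignoreNAN=True):
-- 	selectedListOfList=[]
--
-- 	for LL in listOfListSelectee:
-- 		selectedListOfList.append([])
--
-- 	for i in range(0,len(FlagVector)):
-- 		#print >> stderr,FlagVector[i],FlagValues
--
-- 		if FlagVector[i] in FlagValues:
-- 			#selected!
-- 			#print >> stderr,"selected!"
-- 			hasNAN=False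
--
-- 			if ignoreNAN:
-- 				for j in range(0,len(listOfListSelectee)):
-- 					if listOfListSelectee[j][i]=="nan":
-- 						hasNAN=True
-- 						break
--
-- 				if hasNAN:
-- 					continue
-- 			for j in range(0,len(listOfListSelectee)):
-- 				selectedListOfList[j].append(listOfListSelectee[j][i])
--
-- 	return selectedListOfList
-- ===== SOURCE B (Python) =====
-- def selectVectorByMatchingFlag(listOfListSelectee, FlagVector, FlagValues, ignoreNAN=True):
--     kept = [col for flag, col in zip(FlagVector, zip(*listOfListSelectee))
--             if flag in FlagValues and not (ignoreNAN and "nan" in col)]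
--     if not kept:
--         return [[] for _ in listOfListSelectee]
--     return [list(row) for row in zip(*kept)]
-- ===== Notes on version B (the rewrite author's own statement) =====
-- stated objective: alternative
-- what changed: B works column-major: it transposes the input with zip(*...), filters whole columns by flag membership and the 'nan' test, and transposes the kept columns back, instead of A's element-by-element appends into pre-created empty rows.
-- outside the precondition, e.g. on selectVectorByMatchingFlag([['1']], ['x', 'x'], {'x'}, True): A raises IndexError, B returns [['1']]
import Mathlib
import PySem

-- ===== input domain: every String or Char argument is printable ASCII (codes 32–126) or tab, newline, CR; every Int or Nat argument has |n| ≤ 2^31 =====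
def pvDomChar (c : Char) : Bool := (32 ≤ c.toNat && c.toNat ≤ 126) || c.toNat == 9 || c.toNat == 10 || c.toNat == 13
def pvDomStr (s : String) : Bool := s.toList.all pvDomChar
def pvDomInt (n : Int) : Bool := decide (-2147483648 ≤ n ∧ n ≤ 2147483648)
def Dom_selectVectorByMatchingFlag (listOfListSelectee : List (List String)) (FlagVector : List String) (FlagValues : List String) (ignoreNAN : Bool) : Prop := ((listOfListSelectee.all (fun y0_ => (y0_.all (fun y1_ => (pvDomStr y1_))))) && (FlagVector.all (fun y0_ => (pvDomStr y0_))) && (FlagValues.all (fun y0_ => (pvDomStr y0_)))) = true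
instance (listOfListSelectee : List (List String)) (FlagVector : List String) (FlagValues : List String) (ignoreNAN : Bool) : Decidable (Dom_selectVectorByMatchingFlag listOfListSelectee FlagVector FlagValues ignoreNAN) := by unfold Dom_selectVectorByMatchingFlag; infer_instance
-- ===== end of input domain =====

-- B works column-major: transpose with zip(*·), filter whole columns by flag/"nan", transpose back;
-- A appends element-by-element into pre-created empty rows. Same cost ('alternative').

-- ===== PORT A =====
-- literal transliteration of A: empty rows, then for each column index i the flag test, the optional
-- NaN scan (Python's early `break` agrees with `any` wherever A returns), then an append into every
-- row via List.set; out-of-range accesses (excluded by Pre_) appear as getD defaults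
def selectVectorByMatchingFlag (listOfListSelectee : List (List String)) (FlagVector : List String) (FlagValues : List String) (ignoreNAN : Bool) : List (List String) :=
  let selectedListOfList := listOfListSelectee.map (fun _ => ([] : List String))
  (List.range FlagVector.length).foldl
    (fun sel i =>
      if FlagValues.contains (FlagVector.getD i "") then
        let hasNAN :=
          if ignoreNAN then
            (List.range listOfListSelectee.length).any
              (fun j => (listOfListSelectee.getD j []).getD i "" == "nan")
          else false
        if hasNAN then sel
        else
          (List.range listOfListSelectee.length).foldl
            (fun s j => s.set j ((s.getD j []) ++ [(listOfListSelectee.getD j []).getD i ""]))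
            sel
      else sel)
    selectedListOfList

-- ===== PORT B =====
-- Python's zip(*L): the list of columns of L, truncated to the shortest row; exact — the fuel (first
-- row's length) always bounds the column count, and peeling stops at the first exhausted row
def pyZipStarGo : Nat → List (List String) → List (List String)
  | 0, _ => []
  | n+1, L =>
    match L.mapM List.head? with
    | none => []
    | some hs => hs :: pyZipStarGo n (L.map List.tail)

def pyZipStar (L : List (List String)) : List (List String) :=
  match L with
  | [] => []
  | r :: rs => pyZipStarGo r.length (r :: rs)

-- literal transliteration of B: zip(FlagVector, zip(*L)) pairs each flag with its column, the
-- comprehension filters the columns, and zip(*kept) transposes back (list(row) is the identity here)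
def selectVectorByMatchingFlag_alt (listOfListSelectee : List (List String)) (FlagVector : List String) (FlagValues : List String) (ignoreNAN : Bool) : List (List String) :=
  let kept := ((FlagVector.zip (pyZipStar listOfListSelectee)).filter
      (fun p => FlagValues.contains p.1 && !(ignoreNAN && p.2.contains "nan"))).map Prod.snd
  if kept.isEmpty then listOfListSelectee.map (fun _ => ([] : List String))
  else pyZipStar kept

-- ===== PRECONDITION & SPEC =====
-- Pre_ excludes exactly the inputs where Python A raises IndexError: some flag-matching column index
-- i that is out of range for some row and not saved by an in-range "nan" entry in an earlier row
-- (which makes A's NaN scan break and skip the column).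
def Pre_selectVectorByMatchingFlag (listOfListSelectee : List (List String)) (FlagVector : List String) (FlagValues : List String) (ignoreNAN : Bool) : Prop :=
  ∀ i, i < FlagVector.length → FlagValues.contains (FlagVector.getD i "") = true →
    ((∀ LL ∈ listOfListSelectee, i < LL.length) ∨
     (ignoreNAN = true ∧ ∃ j, j < listOfListSelectee.length ∧
        (∀ k, k ≤ j → i < (listOfListSelectee.getD k []).length) ∧
        (listOfListSelectee.getD j []).getD i "" = "nan"))
instance (listOfListSelectee : List (List String)) (FlagVector : List String) (FlagValues : List String) (ignoreNAN : Bool) : Decidable (Pre_selectVectorByMatchingFlag listOfListSelectee FlagVector FlagValues ignoreNAN) := by unfold Pre_selectVectorByMatchingFlag; infer_instance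

def pvWitness_selectVectorByMatchingFlag : List (List String) × List String × List String × Bool :=
  ([["1", "nan"], ["2", "3"]], ["x", "y"], ["x"], true)

def Spec_selectVectorByMatchingFlag (listOfListSelectee : List (List String)) (FlagVector : List String) (FlagValues : List String) (ignoreNAN : Bool) (out : List (List String)) : Prop := out = selectVectorByMatchingFlag_alt listOfListSelectee FlagVector FlagValues ignoreNAN
instance (listOfListSelectee : List (List String)) (FlagVector : List String) (FlagValues : List String) (ignoreNAN : Bool) (out : List (List String)) : Decidable (Spec_selectVectorByMatchingFlag listOfListSelectee FlagVector FlagValues ignoreNAN out) := by unfold Spec_selectVectorByMatchingFlag; infer_instance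

-- ===== CLAIM (what is proved, stated in full; the proofs are below) =====
def Claim_equal_selectVectorByMatchingFlag : Prop := ∀ (listOfListSelectee : List (List String)) (FlagVector : List String) (FlagValues : List String) (ignoreNAN : Bool), Dom_selectVectorByMatchingFlag listOfListSelectee FlagVector FlagValues ignoreNAN → Pre_selectVectorByMatchingFlag listOfListSelectee FlagVector FlagValues ignoreNAN → Spec_selectVectorByMatchingFlag listOfListSelectee FlagVector FlagValues ignoreNAN (selectVectorByMatchingFlag listOfListSelectee FlagVector FlagValues ignoreNAN)

-- ===== LEMMAS AND PROOFS =====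

lemma fold_set_append (i : Nat) (g : List String → List String) :
    ∀ (tail p q : List (List String)), p.length = q.length →
    (List.range' p.length tail.length).foldl
      (fun s j => s.set j ((s.getD j []) ++ [((p ++ tail).getD j []).getD i ""]))
      (q ++ tail.map g)
    = q ++ tail.map (fun LL => g LL ++ [LL.getD i ""]) := by
  intro tail
  induction tail with
  | nil => intro p q h; simp
  | cons t0 tail' ih =>
    intro p q h
    rw [List.length_cons, List.range'_succ, List.foldl_cons]
    have h1 : (q ++ (t0 :: tail').map g).getD p.length [] = g t0 := by
      rw [h]; rw [List.getD_append_right _ _ _ _ (le_refl _)]; simp [List.getD]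
    have h2 : (p ++ t0 :: tail').getD p.length [] = t0 := by
      rw [List.getD_append_right _ _ _ _ (le_refl _)]; simp [List.getD]
    have hset : (q ++ (t0 :: tail').map g).set p.length (g t0 ++ [t0.getD i ""])
        = (q ++ [g t0 ++ [t0.getD i ""]]) ++ tail'.map g := by
      rw [List.set_append, h]
      simp
    simp only [h1, h2, hset]
    have hlen : (p ++ [t0]).length = (q ++ [g t0 ++ [t0.getD i ""]]).length := by simp [h]
    have happ : p ++ t0 :: tail' = (p ++ [t0]) ++ tail' := by simp
    have hlen2 : p.length + 1 = (p ++ [t0]).length := by simp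
    rw [happ, hlen2, ih (p ++ [t0]) (q ++ [g t0 ++ [t0.getD i ""]]) hlen]
    simp

lemma inv_lemma (L : List (List String)) (FV FVals : List String) (ig : Bool) (n : Nat) :
    (List.range n).foldl
      (fun sel i =>
        if FVals.contains (FV.getD i "") then
          let hasNAN :=
            if ig then (List.range L.length).any (fun j => (L.getD j []).getD i "" == "nan")
            else false
          if hasNAN then sel
          else
            (List.range L.length).foldl
              (fun s j => s.set j ((s.getD j []) ++ [(L.getD j []).getD i ""])) sel
        else sel)
      (L.map (fun _ => ([] : List String)))
    = L.map (fun LL =>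
        (((List.range n).filter (fun i =>
          FVals.contains (FV.getD i "") &&
          (!ig || (List.range L.length).all (fun j => (L.getD j []).getD i "" != "nan")))).map
          (fun i => LL.getD i ""))) := by
  induction n with
  | zero => simp
  | succ n ihn =>
    rw [List.range_succ, List.foldl_append, List.filter_append, ihn]
    simp only [List.foldl_cons, List.foldl_nil, List.filter_cons, List.filter_nil]
    by_cases hc : FVals.contains (FV.getD n "") = true
    · rw [if_pos hc]
      cases ig with
      | false =>
        show (if (if (false : Bool) = true then (List.range L.length).any (fun j => (L.getD j []).getD n "" == "nan") else false) = true
              then _ else _) = _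
        simp only [Bool.false_eq_true, if_false]
        have hb : (FVals.contains (FV.getD n "") &&
            (!(false : Bool) || (List.range L.length).all (fun j => (L.getD j []).getD n "" != "nan"))) = true := by
          rw [hc]; rfl
        have hfold := fold_set_append n
          (fun LL => ((List.range n).filter (fun i =>
            FVals.contains (FV.getD i "") &&
            (!(false : Bool) || (List.range L.length).all (fun j => (L.getD j []).getD i "" != "nan")))).map
            (fun i => LL.getD i "")) L [] [] rfl
        simp only [List.nil_append, List.length_nil, ← List.range_eq_range'] at hfold
        rw [hfold]
        simp only [hb, if_true, List.map_append, List.map_cons, List.map_nil]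
      | true =>
        show (if (if (true : Bool) = true then (List.range L.length).any (fun j => (L.getD j []).getD n "" == "nan") else false) = true
              then _ else _) = _
        simp only [if_true]
        by_cases hany : (List.range L.length).any (fun j => (L.getD j []).getD n "" == "nan") = true
        · have hb : (FVals.contains (FV.getD n "") &&
              (!(true : Bool) || (List.range L.length).all (fun j => (L.getD j []).getD n "" != "nan"))) = false := by
            have hall : (List.range L.length).all (fun j => (L.getD j []).getD n "" != "nan") = false := by
              rw [List.all_eq_not_any_not]
              simp only [bne, Bool.not_not]
              rw [hany]; rfl
            rw [hall]; simp
          rw [if_pos hany]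
          simp only [hb, Bool.false_eq_true, if_false, List.append_nil]
        · have hall : (List.range L.length).all (fun j => (L.getD j []).getD n "" != "nan") = true := by
            rw [List.all_eq_not_any_not]
            simp only [bne, Bool.not_not]
            rw [Bool.not_eq_true] at hany
            rw [hany]; rfl
          have hb : (FVals.contains (FV.getD n "") &&
              (!(true : Bool) || (List.range L.length).all (fun j => (L.getD j []).getD n "" != "nan"))) = true := by
            rw [hc, hall]; rfl
          rw [if_neg hany]
          have hfold := fold_set_append n
            (fun LL => ((List.range n).filter (fun i =>
              FVals.contains (FV.getD i "") &&
              (!(true : Bool) || (List.range L.length).all (fun j => (L.getD j []).getD i "" != "nan")))).map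
              (fun i => LL.getD i "")) L [] [] rfl
          simp only [List.nil_append, List.length_nil, ← List.range_eq_range'] at hfold
          rw [hfold]
          simp only [hb, if_true, List.map_append, List.map_cons, List.map_nil]
    · have hb : (FVals.contains (FV.getD n "") &&
          (!ig || (List.range L.length).all (fun j => (L.getD j []).getD n "" != "nan"))) = false := by
        rw [Bool.not_eq_true] at hc; rw [hc, Bool.false_and]
      rw [if_neg hc]
      simp only [hb, Bool.false_eq_true, if_false, List.append_nil]

-- ---- helpers for the B side ----

def minLen : List (List String) → Nat
  | [] => 0
  | [r] => r.length
  | r :: rs => min r.length (minLen rs)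

lemma minLen_le {L : List (List String)} {r : List String} (h : r ∈ L) : minLen L ≤ r.length := by
  induction L with
  | nil => cases h
  | cons a l ih =>
    cases l with
    | nil => simp at h; subst h; simp [minLen]
    | cons b l' =>
      rcases List.mem_cons.mp h with h | h
      · subst h; simp [minLen]
      · exact le_trans (by simp [minLen]) (ih h)

lemma le_minLen {L : List (List String)} {k : Nat} (hne : L ≠ []) (h : ∀ r ∈ L, k ≤ r.length) :
    k ≤ minLen L := by
  induction L with
  | nil => cases hne rfl
  | cons a l ih =>
    cases l with
    | nil => simpa [minLen] using h a (by simp)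
    | cons b l' =>
      have h1 := h a (by simp)
      have h2 := ih (by simp) (fun r hr => h r (List.mem_cons_of_mem _ hr))
      simp [minLen]; exact ⟨h1, h2⟩

lemma minLen_map_tail {L : List (List String)} (h : ∀ r ∈ L, r ≠ []) :
    minLen (L.map List.tail) = minLen L - 1 := by
  induction L with
  | nil => simp [minLen]
  | cons a l ih =>
    cases l with
    | nil =>
      simp [minLen]
    | cons b l' =>
      have ha := h a (by simp)
      have hrec := ih (fun r hr => h r (List.mem_cons_of_mem _ hr))
      have ha1 : 1 ≤ a.length := by cases a with | nil => cases ha rfl | cons x xs => simp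
      have hm1 : 1 ≤ minLen (b :: l') := le_minLen (by simp) (fun r hr => by
        have := h r (List.mem_cons_of_mem _ hr)
        cases r with | nil => cases this rfl | cons x xs => simp)
      simp only [List.map_cons] at hrec ⊢
      show min a.tail.length (minLen (b.tail :: l'.map List.tail)) = min a.length (minLen (b :: l')) - 1
      rw [hrec, List.length_tail]
      omega

lemma mapM_head_some {L : List (List String)} (h : ∀ r ∈ L, r ≠ []) :
    L.mapM List.head? = some (L.map (fun r => r.headD "")) := by
  induction L with
  | nil => rfl
  | cons a l ih =>
    have ha : a.head? = some (a.headD "") := by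
      cases a with
      | nil => exact absurd rfl (h [] (by simp))
      | cons x xs => rfl
    rw [List.mapM_cons, ha, ih (fun r hr => h r (List.mem_cons_of_mem _ hr))]
    rfl

lemma mapM_head_none {L : List (List String)} (hr : ([] : List String) ∈ L) :
    L.mapM List.head? = none := by
  induction L with
  | nil => cases hr
  | cons a l ih =>
    rcases List.mem_cons.mp hr with h | h
    · rw [← h]; simp [List.mapM_cons]
    · cases ha : a.head? <;> simp [List.mapM_cons, ha, ih h]

lemma headD_eq_getD (r : List String) (d : String) : r.headD d = r.getD 0 d := by
  cases r <;> rfl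

lemma tail_getD {r : List String} (h : r ≠ []) (i : Nat) (d : String) :
    r.tail.getD i d = r.getD (i+1) d := by
  cases r with
  | nil => cases h rfl
  | cons x xs => rfl

lemma pyZipStarGo_spec : ∀ (n : Nat) (L : List (List String)), L ≠ [] →
    pyZipStarGo n L = (List.range (min n (minLen L))).map (fun i => L.map (fun r => r.getD i "")) := by
  intro n
  induction n with
  | zero => intro L _; simp [pyZipStarGo]
  | succ n ih =>
    intro L hL
    by_cases hemp : ∀ r ∈ L, r ≠ []
    · have hm : 1 ≤ minLen L := le_minLen hL (fun r hr => by
        have := hemp r hr; cases r with | nil => cases this rfl | cons x xs => simp)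
      have hstep : pyZipStarGo (n+1) L
          = (L.map (fun r => r.headD "")) :: pyZipStarGo n (L.map List.tail) := by
        show (match L.mapM List.head? with
              | none => []
              | some hs => hs :: pyZipStarGo n (L.map List.tail)) = _
        rw [mapM_head_some hemp]
      rw [hstep, ih (L.map List.tail) (by simpa using hL)]
      rw [minLen_map_tail hemp]
      have hmin : min (n+1) (minLen L) = min n (minLen L - 1) + 1 := by omega
      rw [hmin, List.range_succ_eq_map]
      simp only [List.map_cons, List.map_map]
      congr 1
      · exact List.map_congr_left (fun r _ => headD_eq_getD r "")
      · apply List.map_congr_left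
        intro i _
        simp only [Function.comp]
        exact List.map_congr_left (fun r hr => tail_getD (hemp r hr) i "")
    · push Not at hemp
      obtain ⟨r, hr, he⟩ := hemp
      have hm : minLen L = 0 := by
        have := minLen_le hr
        subst he; simpa using this
      have : pyZipStarGo (n+1) L = [] := by
        show (match L.mapM List.head? with
              | none => []
              | some hs => hs :: pyZipStarGo n (L.map List.tail)) = []
        rw [mapM_head_none (he ▸ hr)]
      rw [this, hm]; simp

lemma pyZipStar_spec {L : List (List String)} (hL : L ≠ []) :
    pyZipStar L = (List.range (minLen L)).map (fun i => L.map (fun r => r.getD i "")) := by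
  cases L with
  | nil => cases hL rfl
  | cons r rs =>
    show pyZipStarGo r.length (r :: rs) = _
    rw [pyZipStarGo_spec r.length (r :: rs) (by simp)]
    have : min r.length (minLen (r :: rs)) = minLen (r :: rs) := by
      have := minLen_le (List.mem_cons_self (l := rs) (a := r))
      omega
    rw [this]

lemma minLen_const {L : List (List String)} {c : Nat} (hne : L ≠ [])
    (h : ∀ r ∈ L, r.length = c) : minLen L = c := by
  cases L with
  | nil => cases hne rfl
  | cons a l =>
    refine le_antisymm ?_ ?_
    · have := minLen_le (List.mem_cons_self (l := l) (a := a))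
      rw [h a (by simp)] at this; exact this
    · exact le_minLen (by simp) (fun r hr => (h r hr).ge)

lemma range_map_getD {α β : Type} (L : List α) (f : α → β) (d : α) :
    (List.range L.length).map (fun j => f (L.getD j d)) = L.map f := by
  apply List.ext_getElem
  · simp
  · intro j h1 h2
    simp only [List.getElem_map, List.getElem_range]
    rw [List.getD_eq_getElem L d (by simpa using h2)]

lemma range_all_getD (L : List (List String)) (f : List String → Bool) :
    (List.range L.length).all (fun j => f (L.getD j [])) = L.all f := by
  rw [Bool.eq_iff_iff]
  simp only [List.all_eq_true, List.mem_range]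
  constructor
  · intro h r hr
    obtain ⟨j, hj, rfl⟩ := List.getElem_of_mem hr
    have := h j hj
    rwa [List.getD_eq_getElem L [] hj] at this
  · intro h j hj
    rw [List.getD_eq_getElem L [] hj]
    exact h _ (List.getElem_mem hj)

lemma zip_range_map (FV : List String) (m : Nat) (col : Nat → List String) :
    FV.zip ((List.range m).map col)
      = (List.range (min FV.length m)).map (fun i => (FV.getD i "", col i)) := by
  apply List.ext_getElem
  · simp
  · intro i h1 h2
    simp only [List.getElem_zip, List.getElem_map, List.getElem_range]
    have hi : i < FV.length := by simp at h2; omega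
    rw [List.getD_eq_getElem FV "" hi]

lemma filter_range_restrict (p : Nat → Bool) (k n : Nat) (hk : k ≤ n)
    (h : ∀ i, k ≤ i → i < n → p i = false) :
    (List.range n).filter p = (List.range k).filter p := by
  have : n = k + (n - k) := by omega
  rw [this, List.range_add, List.filter_append]
  have : ((List.range (n - k)).map (fun i => k + i)).filter p = [] := by
    apply List.filter_eq_nil_iff.mpr
    intro a ha
    obtain ⟨i, hi, rfl⟩ := List.mem_map.mp ha
    simp only [List.mem_range] at hi
    simp [h (k + i) (by omega) (by omega)]
  rw [this, List.append_nil]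

lemma contains_map_any (L : List (List String)) (g : List String → String) (x : String) :
    (L.map g).contains x = L.any (fun r => g r == x) := by
  induction L with
  | nil => rfl
  | cons a l ih =>
    simp only [List.map_cons, List.contains_cons, List.any_cons, ih]
    congr 1
    rw [Bool.eq_iff_iff]
    simp only [beq_iff_eq]
    exact eq_comm

lemma getD_map_getD (L : List (List String)) (f : List String → String) {j : Nat}
    (hj : j < L.length) : (L.map f).getD j "" = f (L.getD j []) := by
  rw [List.getD_eq_getElem _ "" (by simpa using hj), List.getD_eq_getElem _ [] hj,
    List.getElem_map]

-- B's port equals the same map/filter normal form that inv_lemma gives for A's port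
lemma alt_eq (L : List (List String)) (FV Vals : List String) (ig : Bool)
    (hpre : Pre_selectVectorByMatchingFlag L FV Vals ig) :
    selectVectorByMatchingFlag_alt L FV Vals ig
    = L.map (fun LL =>
        (((List.range FV.length).filter (fun i =>
          Vals.contains (FV.getD i "") &&
          (!ig || (List.range L.length).all (fun j => (L.getD j []).getD i "" != "nan")))).map
          (fun i => LL.getD i ""))) := by
  cases hLcase : L with
  | nil =>
    have h1 : pyZipStar ([] : List (List String)) = [] := rfl
    simp [selectVectorByMatchingFlag_alt, h1, List.zip_nil_right]
  | cons r0 rs0 =>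
    rw [← hLcase]
    have hL : L ≠ [] := by rw [hLcase]; simp
    set m := minLen L with hm
    set col : Nat → List String := fun i => L.map (fun r => r.getD i "") with hcol
    set q : Nat → Bool := fun i =>
      Vals.contains (FV.getD i "") &&
      (!ig || (List.range L.length).all (fun j => (L.getD j []).getD i "" != "nan")) with hq
    -- the filter predicate of B, composed through the pairing, equals q
    have hpred : ∀ i : Nat,
        (Vals.contains (FV.getD i "") && !(ig && (col i).contains "nan")) = q i := by
      intro i
      rw [hq]
      congr 1
      rw [Bool.not_and, hcol]
      congr 1
      rw [contains_map_any, range_all_getD L (fun r => r.getD i "" != "nan")]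
      rw [List.all_eq_not_any_not]
      congr 1
      exact List.any_congr rfl (fun r => by simp [bne])
    -- under Pre_, every index q keeps is strictly below every row length (hence below m)
    have hqlt : ∀ i, i < FV.length → q i = true → i < m := by
      intro i hiFV hqi
      rw [hq] at hqi
      rw [Bool.and_eq_true] at hqi
      obtain ⟨hcont, hrest⟩ := hqi
      have hall : ∀ LL ∈ L, i < LL.length := by
        rcases hpre i hiFV hcont with h | ⟨hig, j, hj, _, hnan⟩
        · exact h
        · exfalso
          rw [hig] at hrest
          simp only [Bool.not_true, Bool.false_or, List.all_eq_true, List.mem_range] at hrest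
          have := hrest j hj
          rw [hnan] at this
          simp [bne] at this
      exact lt_of_lt_of_le (Nat.lt_succ_self i)
        (hm ▸ le_minLen hL (fun r hr => Nat.succ_le_of_lt (hall r hr)))
    have hzip := pyZipStar_spec hL
    -- normalise B's kept list
    have hkept :
        ((FV.zip (pyZipStar L)).filter
          (fun p => Vals.contains p.1 && !(ig && p.2.contains "nan"))).map Prod.snd
        = ((List.range FV.length).filter q).map col := by
      rw [hzip, ← hm, ← hcol, zip_range_map, List.filter_map, List.map_map]
      have hcomp :
          ((fun p : String × List String => Vals.contains p.1 && !(ig && p.2.contains "nan")) ∘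
            (fun i => (FV.getD i "", col i))) = fun i => q i := by
        funext i; exact hpred i
      rw [hcomp]
      have hrestrict : (List.range FV.length).filter q
          = (List.range (min FV.length m)).filter q := by
        apply filter_range_restrict q (min FV.length m) FV.length (by omega)
        intro i hge hlt
        by_contra hne
        rw [Bool.not_eq_false] at hne
        have := hqlt i hlt hne
        omega
      rw [← hrestrict]
      rfl
    show (let kept := ((FV.zip (pyZipStar L)).filter
            (fun p => Vals.contains p.1 && !(ig && p.2.contains "nan"))).map Prod.snd
          if kept.isEmpty then L.map (fun _ => ([] : List String)) else pyZipStar kept) = _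
    rw [hkept]
    by_cases hnil : (List.range FV.length).filter q = []
    · simp [hnil]
    · have hne : (((List.range FV.length).filter q).map col) ≠ [] := by
        simpa using hnil
      rw [if_neg (by simpa [List.isEmpty_iff] using hne)]
      have huni : ∀ c ∈ ((List.range FV.length).filter q).map col, c.length = L.length := by
        intro c hc
        obtain ⟨i, _, rfl⟩ := List.mem_map.mp hc
        simp [hcol]
      rw [pyZipStar_spec hne, minLen_const hne huni]
      rw [← range_map_getD L (fun LL =>
        (((List.range FV.length).filter q).map (fun i => LL.getD i ""))) []]
      apply List.map_congr_left
      intro j hj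
      rw [List.mem_range] at hj
      rw [List.map_map]
      apply List.map_congr_left
      intro i _
      simp only [Function.comp]
      exact getD_map_getD L _ hj

-- ===== VERDICT (by name: the statement is the Claim_ definition above) =====
theorem selectVectorByMatchingFlag_spec : Claim_equal_selectVectorByMatchingFlag := by
  intro L FV Vals ig _ hpre
  unfold Spec_selectVectorByMatchingFlag selectVectorByMatchingFlag
  rw [inv_lemma L FV Vals ig FV.length]
  exact (alt_eq L FV Vals ig hpre).symm
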